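-- pv_equiv track=rewrite | github.com/Fr3nn3r/AgenticContextBuilder | src/context_builder/pipeline/claim_stages/screening.py | get_fact
-- ===== SOURCE A (Python) =====
-- from typing import Any, Callable, Dict, List, Optional, Protocol, Tuple, runtime_checkable
--
-- def get_fact(facts: List[Dict], name: str) -> Optional[str]:
--     """Get a fact value by name, with suffix match fallback.
--
--     Tries exact match first, then suffix match for prefixed fact names
--     (e.g., 'document_date' matches 'cost_estimate.document_date').
--
--     Args:
--         facts: List of fact dicts with 'name' and 'value' keys.
--         name: Fact name to search for.
--
--     Returns:
--         Fact value string, or None if not found.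
--     """
--     # Exact match first
--     for f in facts:
--         if f.get("name") == name:
--             return f.get("value")
--     # Suffix match (e.g., "document_date" matches "cost_estimate.document_date")
--     for f in facts:
--         fact_name = f.get("name", "")
--         if fact_name.endswith("." + name):
--             return f.get("value")
--     return None
-- ===== SOURCE B (Python) =====
-- def get_fact(facts, name):
--     """Single pass: exact match returns immediately; first suffix match is
--     remembered as a fallback and returned only after the whole list is scanned."""
--     candidate = None
--     found = False
--     suffix = "." + name
--     for f in facts:
--         if f.get("name") == name:
--             return f.get("value")
--         if not found and f.get("name", "").endswith(suffix):
--             candidate = f.get("value")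
--             found = True
--     return candidate if found else None
-- ===== Notes on version B (the rewrite author's own statement) =====
-- stated objective: alternative
-- what changed: Replaces A's two sequential scans (exact pass, then suffix pass) by a single pass that returns on an exact match and records the first suffix match as a fallback candidate.
import Mathlib
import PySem

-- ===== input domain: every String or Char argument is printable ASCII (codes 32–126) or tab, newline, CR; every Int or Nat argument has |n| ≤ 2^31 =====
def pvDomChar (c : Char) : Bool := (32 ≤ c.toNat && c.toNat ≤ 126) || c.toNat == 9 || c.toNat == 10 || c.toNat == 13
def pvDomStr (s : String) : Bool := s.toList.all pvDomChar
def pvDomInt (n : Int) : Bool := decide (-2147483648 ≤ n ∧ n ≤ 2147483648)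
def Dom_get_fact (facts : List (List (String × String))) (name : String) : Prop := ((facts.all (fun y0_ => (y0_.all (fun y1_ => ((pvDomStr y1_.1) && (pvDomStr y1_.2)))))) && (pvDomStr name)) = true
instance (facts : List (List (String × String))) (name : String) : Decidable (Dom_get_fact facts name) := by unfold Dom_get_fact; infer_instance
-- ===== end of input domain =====

-- Header: B merges A's two sequential scans into one pass that returns on an exact
-- match and remembers the first suffix match as a fallback (alternative decomposition).

-- ===== PORT A =====
-- first loop of A: return first fact with f.get("name") == name (the returned value is f.get("value"))
def pvExactLoop (facts : List (List (String × String))) (name : String) : Option (Option String) :=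
  match facts with
  | [] => none
  | f :: rest =>
    if (PySem.Dict.mk f).get? "name" = some name then some ((PySem.Dict.mk f).get? "value")
    else pvExactLoop rest name

-- second loop of A: return first fact whose f.get("name","") ends with "." + name
def pvSuffixLoop (facts : List (List (String × String))) (name : String) : Option (Option String) :=
  match facts with
  | [] => none
  | f :: rest =>
    if PySem.Str.endswith ((PySem.Dict.mk f).getD "name" "") ("." ++ name) then
      some ((PySem.Dict.mk f).get? "value")
    else pvSuffixLoop rest name

def get_fact (facts : List (List (String × String))) (name : String) : Option String :=
  match pvExactLoop facts name with
  | some v => v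
  | none =>
    match pvSuffixLoop facts name with
    | some v => v
    | none => none

-- ===== PORT B =====
-- single pass with the recorded fallback candidate and the 'found' flag
def pvGo (facts : List (List (String × String))) (name : String)
    (cand : Option String) (found : Bool) : Option String :=
  match facts with
  | [] => if found then cand else none
  | f :: rest =>
    if (PySem.Dict.mk f).get? "name" = some name then (PySem.Dict.mk f).get? "value"
    else if !found && PySem.Str.endswith ((PySem.Dict.mk f).getD "name" "") ("." ++ name) then
      pvGo rest name ((PySem.Dict.mk f).get? "value") true
    else pvGo rest name cand found

def get_fact_alt (facts : List (List (String × String))) (name : String) : Option String :=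
  pvGo facts name none false

-- ===== PRECONDITION & SPEC =====
def Spec_get_fact (facts : List (List (String × String))) (name : String) (out : Option String) : Prop := out = get_fact_alt facts name
instance (facts : List (List (String × String))) (name : String) (out : Option String) : Decidable (Spec_get_fact facts name out) := by unfold Spec_get_fact; infer_instance

-- ===== CLAIM (what is proved, stated in full; the proofs are below) =====
def Claim_equal_get_fact : Prop := ∀ (facts : List (List (String × String))) (name : String), Dom_get_fact facts name → Spec_get_fact facts name (get_fact facts name)

-- ===== LEMMAS AND PROOFS =====
-- the single pass equals: first the exact scan; failing that, the recorded candidate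
-- (if one was found before this suffix of the list began), else the suffix scan
theorem pvGo_eq (facts : List (List (String × String))) (name : String)
    (cand : Option String) (found : Bool) :
    pvGo facts name cand found =
      match pvExactLoop facts name with
      | some v => v
      | none =>
        if found then cand
        else
          match pvSuffixLoop facts name with
          | some v => v
          | none => none := by
  induction facts generalizing cand found with
  | nil => simp [pvGo, pvExactLoop, pvSuffixLoop]
  | cons f rest ih =>
    by_cases hx : (PySem.Dict.mk f).get? "name" = some name
    · simp [pvGo, pvExactLoop, hx]
    · by_cases hf : found
      · simp [pvGo, pvExactLoop, hx, hf, ih]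
      · by_cases hs : PySem.Str.endswith ((PySem.Dict.mk f).getD "name" "") ("." ++ name) = true
        all_goals simp only [PySem.Str.endswith_eq, String.toList_append, show (".".toList = ['.']) from rfl, List.cons_append, List.nil_append] at hs
        · simp [pvGo, pvExactLoop, pvSuffixLoop, hx, hf, hs, ih]
        · simp [pvGo, pvExactLoop, pvSuffixLoop, hx, hf, hs, ih]

-- ===== VERDICT (by name: the statement is the Claim_ definition above) =====
theorem get_fact_spec : Claim_equal_get_fact := by
  intro facts name _
  unfold Spec_get_fact get_fact get_fact_alt
  rw [pvGo_eq]
  simp
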